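-- pv_equiv track=rewrite | github.com/pypi-data/pypi-mirror-303 | packages/git-wise/git_wise-0.1.4-py3-none-any.whl/git_wise/utils/git_utils.py | extract_diff_hunks
-- ===== SOURCE A (Python) =====
-- def extract_diff_hunks(diff_content: str) -> str:
--     """Extract only the changed hunks from a diff output"""
--     lines = diff_content.split('\n')
--     hunks = []
--     current_hunk = []
--
--     for line in lines:
--         if line.startswith('@@'):
--             if current_hunk:
--                 hunks.append('\n'.join(current_hunk))
--                 current_hunk = []
--         if line.startswith(('@@', '+', '-')) and not line.startswith('+++') and not line.startswith('---'):
--             current_hunk.append(line)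
--
--     if current_hunk:
--         hunks.append('\n'.join(current_hunk))
--
--     return '\n'.join(hunks)
-- ===== SOURCE B (Python) =====
-- def extract_diff_hunks(diff_content: str) -> str:
--     """Extract only the changed hunks from a diff output (single stateless filter)."""
--     return '\n'.join(
--         line
--         for line in diff_content.split('\n')
--         if line.startswith(('@@', '+', '-'))
--         and not line.startswith('+++')
--         and not line.startswith('---')
--     )
-- ===== Notes on version B (the rewrite author's own statement) =====
-- stated objective: simpler
-- what changed: Replaced A's stateful hunk-grouping loop (hunks list, current_hunk buffer, flush-on-@@ branch and final flush) by a single stateless filter over the split lines joined once with the newline separator, since the grouping never affects the returned string.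
import Mathlib
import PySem

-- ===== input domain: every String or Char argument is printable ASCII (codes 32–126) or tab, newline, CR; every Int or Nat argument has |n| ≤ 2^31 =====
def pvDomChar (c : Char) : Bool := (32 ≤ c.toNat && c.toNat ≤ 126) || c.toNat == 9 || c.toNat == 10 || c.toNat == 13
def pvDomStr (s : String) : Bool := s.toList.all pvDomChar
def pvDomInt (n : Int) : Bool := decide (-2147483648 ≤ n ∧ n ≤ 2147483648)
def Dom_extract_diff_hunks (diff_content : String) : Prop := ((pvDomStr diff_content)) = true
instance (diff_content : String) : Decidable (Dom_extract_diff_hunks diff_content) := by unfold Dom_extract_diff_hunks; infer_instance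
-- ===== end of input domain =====

-- B replaces A's stateful hunk-grouping loop (hunks list + current_hunk buffer + flush
-- branch) by a single stateless filter-and-join; same return value on every input (simpler).

-- shared line predicate: line.startswith(('@@','+','-')) and not line.startswith('+++') and not line.startswith('---')
def pvKeepLine (line : List Char) : Bool :=
  (PySem.Chars.startswith line ['@', '@'] || PySem.Chars.startswith line ['+'] ||
      PySem.Chars.startswith line ['-'])
  && !PySem.Chars.startswith line ['+', '+', '+']
  && !PySem.Chars.startswith line ['-', '-', '-']

-- ===== PORT A =====
-- loop body of A: state = (hunks, current_hunk); flush branch, then conditional append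
def pvStepA (st : List (List Char) × List (List Char)) (line : List Char) :
    List (List Char) × List (List Char) :=
  let st1 :=
    if PySem.Chars.startswith line ['@', '@'] then
      (if st.2.isEmpty then st else (st.1 ++ [PySem.Chars.join ['\n'] st.2], []))
    else st
  if pvKeepLine line then (st1.1, st1.2 ++ [line]) else st1

def extract_diff_hunks (diff_content : String) : String :=
  -- lines = diff_content.split('\n')  (Chars.splitOn is the sep ≠ '' split, exact)
  let lines := PySem.Chars.splitOn diff_content.toList ['\n']
  let st := lines.foldl pvStepA ([], [])
  -- final flush: if current_hunk: hunks.append('\n'.join(current_hunk))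
  let hunks := if st.2.isEmpty then st.1 else st.1 ++ [PySem.Chars.join ['\n'] st.2]
  String.ofList (PySem.Chars.join ['\n'] hunks)

-- ===== PORT B =====
def extract_diff_hunks_alt (diff_content : String) : String :=
  String.ofList (PySem.Chars.join ['\n']
    ((PySem.Chars.splitOn diff_content.toList ['\n']).filter pvKeepLine))

-- ===== PRECONDITION & SPEC =====
def Spec_extract_diff_hunks (diff_content : String) (out : String) : Prop := out = extract_diff_hunks_alt diff_content
instance (diff_content : String) (out : String) : Decidable (Spec_extract_diff_hunks diff_content out) := by unfold Spec_extract_diff_hunks; infer_instance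

-- ===== CLAIM (what is proved, stated in full; the proofs are below) =====
def Claim_equal_extract_diff_hunks : Prop := ∀ (diff_content : String), Dom_extract_diff_hunks diff_content → Spec_extract_diff_hunks diff_content (extract_diff_hunks diff_content)

-- ===== LEMMAS AND PROOFS =====

-- merging two adjacent already-joined pieces into one joined piece
lemma pv_join_merge (sep p q : List Char) (xs : List (List Char)) :
    PySem.Chars.join sep (xs ++ [p, q]) = PySem.Chars.join sep (xs ++ [p ++ sep ++ q]) := by
  induction xs with
  | nil =>
      simp [PySem.Chars.join_cons_cons, PySem.Chars.join_singleton]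
  | cons y ys ih =>
      cases ys with
      | nil =>
          simp [PySem.Chars.join_cons_cons, PySem.Chars.join_singleton, List.append_assoc]
      | cons z zs =>
          have h1 : (y :: z :: zs) ++ [p, q] = y :: ((z :: zs) ++ [p, q]) := by simp
          have h2 : (y :: z :: zs) ++ [p ++ sep ++ q] = y :: ((z :: zs) ++ [p ++ sep ++ q]) := by
            simp
          rw [h1, h2]
          have hc : ∃ w ws, (z :: zs) ++ [p, q] = w :: ws := ⟨z, zs ++ [p, q], by simp⟩
          obtain ⟨w, ws, hw⟩ := hc
          have hc2 : ∃ w' ws', (z :: zs) ++ [p ++ sep ++ q] = w' :: ws' :=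
            ⟨z, zs ++ [p ++ sep ++ q], by simp⟩
          obtain ⟨w', ws', hw'⟩ := hc2
          rw [hw, hw', PySem.Chars.join_cons_cons, PySem.Chars.join_cons_cons, ← hw, ← hw', ih]

-- join distributes over ++ of two nonempty lists of pieces
lemma pv_join_append (sep : List Char) (xs : List (List Char)) :
    ∀ (x : List Char) (b : List (List Char)), b ≠ [] →
      PySem.Chars.join sep ((x :: xs) ++ b) =
        PySem.Chars.join sep (x :: xs) ++ sep ++ PySem.Chars.join sep b := by
  induction xs with
  | nil =>
      intro x b hb
      cases b with
      | nil => exact absurd rfl hb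
      | cons y ys =>
          simp [PySem.Chars.join_cons_cons, PySem.Chars.join_singleton]
  | cons z zs ih =>
      intro x b hb
      have h1 : (x :: z :: zs) ++ b = x :: ((z :: zs) ++ b) := by simp
      rw [h1]
      have hc : ∃ w ws, (z :: zs) ++ b = w :: ws := ⟨z, zs ++ b, by simp⟩
      obtain ⟨w, ws, hw⟩ := hc
      rw [hw, PySem.Chars.join_cons_cons, ← hw, ih z b hb, PySem.Chars.join_cons_cons]
      simp [List.append_assoc]

-- a line starting with '@@' passes the keep test
lemma pv_keep_of_at (l : List Char) (h : PySem.Chars.startswith l ['@', '@'] = true) :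
    pvKeepLine l = true := by
  obtain ⟨t, rfl⟩ := (PySem.Chars.startswith_iff l ['@', '@']).mp h
  simp [pvKeepLine, PySem.Chars.startswith, List.isPrefixOf]

-- the tail that A's final flush produces from a pending buffer
def pvTail (cur : List (List Char)) : List (List Char) :=
  if cur.isEmpty then [] else [PySem.Chars.join ['\n'] cur]

-- invariant of A's loop: finishing from state (hunks, cur) yields the join of
-- hunks followed by one merged piece made of cur and all still-to-be-kept lines
lemma pv_loopA_invariant (lines : List (List Char)) :
    ∀ (hunks cur : List (List Char)),
      (PySem.Chars.join ['\n']
        (if (lines.foldl pvStepA (hunks, cur)).2.isEmpty then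
          (lines.foldl pvStepA (hunks, cur)).1
         else
          (lines.foldl pvStepA (hunks, cur)).1 ++
            [PySem.Chars.join ['\n'] (lines.foldl pvStepA (hunks, cur)).2])) =
      PySem.Chars.join ['\n'] (hunks ++ pvTail (cur ++ lines.filter pvKeepLine)) := by
  induction lines with
  | nil =>
      intro hunks cur
      cases cur with
      | nil => simp [pvTail]
      | cons c cs => simp [pvTail]
  | cons l rest ih =>
      intro hunks cur
      by_cases hat : PySem.Chars.startswith l ['@', '@'] = true
      · have hkeep := pv_keep_of_at l hat
        cases cur with
        | nil =>
            have hstep : pvStepA (hunks, ([] : List (List Char))) l = (hunks, [l]) := by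
              simp [pvStepA, hat, hkeep]
            simp only [List.foldl_cons, hstep, List.filter_cons, hkeep]
            exact ih hunks [l]
        | cons c cs =>
            have hstep : pvStepA (hunks, c :: cs) l =
                (hunks ++ [PySem.Chars.join ['\n'] (c :: cs)], [l]) := by
              simp [pvStepA, hat, hkeep]
            simp only [List.foldl_cons, hstep, List.filter_cons, hkeep, if_true]
            rw [ih (hunks ++ [PySem.Chars.join ['\n'] (c :: cs)]) [l]]
            have hne : ([l] ++ rest.filter pvKeepLine) ≠ [] := by simp
            have htail : pvTail ([l] ++ rest.filter pvKeepLine) =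
                [PySem.Chars.join ['\n'] (l :: rest.filter pvKeepLine)] := by
              simp [pvTail]
            have htail2 : pvTail ((c :: cs) ++ l :: rest.filter pvKeepLine) =
                [PySem.Chars.join ['\n'] ((c :: cs) ++ l :: rest.filter pvKeepLine)] := by
              simp [pvTail]
            rw [htail]
            simp only [List.cons_append] at htail2 ⊢
            rw [htail2]
            have hsplit := pv_join_append ['\n'] cs c (l :: rest.filter pvKeepLine) (by simp)
            rw [show (c :: (cs ++ l :: List.filter pvKeepLine rest)) =
                (c :: cs) ++ (l :: List.filter pvKeepLine rest) from by simp, hsplit]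
            have := pv_join_merge ['\n'] (PySem.Chars.join ['\n'] (c :: cs))
              (PySem.Chars.join ['\n'] (l :: rest.filter pvKeepLine)) hunks
            simpa [List.append_assoc] using this
      · -- no flush; line may still be kept
        by_cases hk : pvKeepLine l = true
        · have hstep : pvStepA (hunks, cur) l = (hunks, cur ++ [l]) := by
            simp [pvStepA, hat, hk]
          simp only [List.foldl_cons, hstep, List.filter_cons, hk]
          rw [ih hunks (cur ++ [l])]
          simp [List.append_assoc]
        · have hstep : pvStepA (hunks, cur) l = (hunks, cur) := by
            simp [pvStepA, hat, hk]
          simp only [List.foldl_cons, hstep, List.filter_cons, hk]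
          exact ih hunks cur

-- ===== VERDICT (by name: the statement is the Claim_ definition above) =====
theorem extract_diff_hunks_spec : Claim_equal_extract_diff_hunks := by
  intro diff_content _
  unfold Spec_extract_diff_hunks
  have h := pv_loopA_invariant (PySem.Chars.splitOn diff_content.toList ['\n']) [] []
  simp only [List.nil_append] at h
  have hA : extract_diff_hunks diff_content =
      String.ofList (PySem.Chars.join ['\n']
        (if (List.foldl pvStepA ([], []) (PySem.Chars.splitOn diff_content.toList ['\n'])).2.isEmpty = true then
          (List.foldl pvStepA ([], []) (PySem.Chars.splitOn diff_content.toList ['\n'])).1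
        else
          (List.foldl pvStepA ([], []) (PySem.Chars.splitOn diff_content.toList ['\n'])).1 ++
            [PySem.Chars.join ['\n'] (List.foldl pvStepA ([], []) (PySem.Chars.splitOn diff_content.toList ['\n'])).2])) := rfl
  rw [hA, h]
  unfold extract_diff_hunks_alt
  cases hk : (PySem.Chars.splitOn diff_content.toList ['\n']).filter pvKeepLine with
  | nil => simp [pvTail, PySem.Chars.join_nil]
  | cons y ys => simp [pvTail, PySem.Chars.join_singleton]
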